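-- pv_equiv track=rewrite | github.com/Azure/cyclecloud-slurm | slurm/src/slurmcc/util.py | parse_show_nodes
-- ===== SOURCE A (Python) =====
-- from typing import Any, Callable, Dict, List, Optional, Union
--
-- def parse_show_nodes(stdout: str) -> List[Dict[str, Any]]:
--     ret = []
--     current_node = None
--     for line in stdout.splitlines():
--         line = line.strip()
--
--         for sub_expr in line.split():
--             if "=" not in sub_expr:
--                 continue
--             key, value = sub_expr.split("=", 1)
--             if key == "NodeName":
--                 if current_node:
--                     ret.append(current_node)
--                 current_node = {}
--             assert current_node is not None
--             current_node[key] = value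
--     if current_node:
--         ret.append(current_node)
--     return ret
-- ===== SOURCE B (Python) =====
-- from typing import Any, Dict, List
--
--
-- def parse_show_nodes(stdout: str) -> List[Dict[str, Any]]:
--     # pass 1: tokenize the whole input at once; keep only "key=value" tokens
--     pairs = [tuple(tok.split("=", 1)) for tok in stdout.split() if "=" in tok]
--     # pass 2: group the pair stream into one dict per NodeName-led run
--     ret = []
--     i = 0
--     while i < len(pairs):
--         assert pairs[i][0] == "NodeName"
--         j = i + 1
--         while j < len(pairs) and pairs[j][0] != "NodeName":
--             j += 1
--         ret.append(dict(pairs[i:j]))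
--         i = j
--     return ret
-- ===== Notes on version B (the rewrite author's own statement) =====
-- stated objective: alternative
-- what changed: B separates tokenization from grouping: one whitespace split of the whole input into a flat key=value pair list, then an index-based second pass that slices each NodeName-led run out and builds its dict at once, instead of A's per-line loops with an inline current_node accumulator.
import Mathlib
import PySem

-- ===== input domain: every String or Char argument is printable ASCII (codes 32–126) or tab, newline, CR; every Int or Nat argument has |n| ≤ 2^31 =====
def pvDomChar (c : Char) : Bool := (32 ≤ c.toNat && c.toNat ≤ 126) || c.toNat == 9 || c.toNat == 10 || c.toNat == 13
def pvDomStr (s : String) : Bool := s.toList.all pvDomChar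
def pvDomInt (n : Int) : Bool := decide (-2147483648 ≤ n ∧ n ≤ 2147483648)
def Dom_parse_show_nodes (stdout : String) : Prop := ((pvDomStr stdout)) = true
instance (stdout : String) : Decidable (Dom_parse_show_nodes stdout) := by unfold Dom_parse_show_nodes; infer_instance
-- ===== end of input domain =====

-- B re-decomposes A's per-line parsing into tokenize-whole-input + group-pair-runs; same return value (proved below).

-- ===== PORT A =====
-- strings are handled on the List Char side (PySem.Chars), pairs converted to String at append time
def pvNN : List Char := ['N','o','d','e','N','a','m','e']

def pvConv (l : List (List Char × List Char)) : List (String × String) :=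
  l.map (fun p => (String.ofList p.1, String.ofList p.2))

def pvAStep (st : List (List (String × String)) × Option (PySem.Dict (List Char) (List Char)))
    (sub : List Char) :
    List (List (String × String)) × Option (PySem.Dict (List Char) (List Char)) :=
  if PySem.Chars.isIn ['='] sub then
    match PySem.Chars.splitOnMax sub ['='] 1 with
    | [key, value] =>
        let st1 :=
          if key = pvNN then
            ((match st.2 with
              | some d => if d.items.isEmpty then st.1 else st.1 ++ [pvConv d.items]
              | none => st.1),
             some (PySem.Dict.mk []))
          else st
        match st1.2 with
        | some d => (st1.1, some (d.insert key value))
        | none => st1                      -- Python raises AssertionError here (outside Pre_)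
    | _ => st                              -- unreachable: '=' ∈ sub yields exactly two parts
  else st                                  -- "=" not in sub_expr: continue

def parse_show_nodes (stdout : String) : List (List (String × String)) :=
  let fin :=
    (PySem.Chars.splitlines stdout.toList).foldl
      (fun st line => (PySem.Chars.split₀ (PySem.Chars.strip line)).foldl pvAStep st)
      ([], none)
  match fin.2 with
  | some d => if d.items.isEmpty then fin.1 else fin.1 ++ [pvConv d.items]
  | none => fin.1

-- ===== PORT B =====
def pvParseTok (t : List Char) : Option (List Char × List Char) :=
  if PySem.Chars.isIn ['='] t then
    match PySem.Chars.splitOnMax t ['='] 1 with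
    | [k, v] => some (k, v)
    | _ => none
  else none

def pvDictOf (ps : List (List Char × List Char)) : PySem.Dict (List Char) (List Char) :=
  ps.foldl (fun d p => d.insert p.1 p.2) (PySem.Dict.mk [])

-- the index scan "j = i+1; while pairs[j][0] != 'NodeName'" + slice pairs[i:j]
def pvBGroups : List (List Char × List Char) → List (List (String × String))
  | [] => []
  | p :: rest =>
      pvConv (pvDictOf (p :: rest.takeWhile (fun q => !(q.1 == pvNN)))).items
        :: pvBGroups (rest.dropWhile (fun q => !(q.1 == pvNN)))
termination_by ps => ps.length
decreasing_by
  simpa using Nat.lt_succ_of_le (List.length_dropWhile_le _ _)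

def parse_show_nodes_alt (stdout : String) : List (List (String × String)) :=
  pvBGroups ((PySem.Chars.split₀ stdout.toList).filterMap pvParseTok)

-- ===== PRECONDITION & SPEC =====
-- Pre_ excludes exactly the inputs where a key=value token precedes the first NodeName=… token:
-- there Python A (and B alike) raises AssertionError instead of returning.
def Pre_parse_show_nodes (stdout : String) : Prop :=
  (((PySem.Chars.split₀ stdout.toList).filter (fun t => PySem.Chars.isIn ['='] t)).take 1).all
    (fun t => PySem.Chars.startswith t (pvNN ++ ['='])) = true
instance (stdout : String) : Decidable (Pre_parse_show_nodes stdout) := by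
  unfold Pre_parse_show_nodes; infer_instance

def pvWitness_parse_show_nodes : String := "NodeName=n1 State=IDLE\nNodeName=n2 State=DOWN"

def Spec_parse_show_nodes (stdout : String) (out : List (List (String × String))) : Prop := out = parse_show_nodes_alt stdout
instance (stdout : String) (out : List (List (String × String))) : Decidable (Spec_parse_show_nodes stdout out) := by unfold Spec_parse_show_nodes; infer_instance

-- ===== CLAIM (what is proved, stated in full; the proofs are below) =====
def Claim_equal_parse_show_nodes : Prop := ∀ (stdout : String), Dom_parse_show_nodes stdout → Pre_parse_show_nodes stdout → Spec_parse_show_nodes stdout (parse_show_nodes stdout)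

-- ===== LEMMAS AND PROOFS =====

def pvW : List Char → List Char → List (List Char)
  | [], cur => if cur.isEmpty then [] else [cur.reverse]
  | c :: r, cur =>
      if PySem.Chars.isspace c then
        if cur.isEmpty then pvW r [] else cur.reverse :: pvW r []
      else pvW r (c :: cur)

theorem pvW_go (s cur acc) : PySem.Chars.split₀.go s cur acc = acc.reverse ++ pvW s cur := by
  induction s generalizing cur acc with
  | nil =>
    simp only [PySem.Chars.split₀.go, pvW]
    cases cur <;> simp
  | cons c r ih =>
    simp only [PySem.Chars.split₀.go, pvW]
    by_cases hc : PySem.Chars.isspace c <;> simp only [hc, if_true, if_false]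
    · cases cur <;> simp [ih]
    · exact ih _ _

def pvSL (isB : Char → Bool) : List Char → List Char → List (List Char)
  | [], cur => if cur.isEmpty then [] else [cur.reverse]
  | '\r' :: '\n' :: r, cur => cur.reverse :: pvSL isB r []
  | c :: r, cur => if isB c then cur.reverse :: pvSL isB r [] else pvSL isB r (c :: cur)

theorem pvSL_go (isB s cur acc) :
    PySem.Chars.splitlines.go isB s cur acc = acc.reverse ++ pvSL isB s cur := by
  fun_induction pvSL isB s cur generalizing acc <;> simp_all [PySem.Chars.splitlines.go, pvSL]

theorem pvW_space_append (cs ds : List Char) (c : Char) (hc : PySem.Chars.isspace c = true) :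
    ∀ cur, pvW (cs ++ c :: ds) cur = pvW cs cur ++ pvW ds [] := by
  induction cs with
  | nil => intro cur; cases cur <;> simp [pvW, hc]
  | cons c' cs ih =>
    intro cur
    simp only [List.cons_append, pvW]
    by_cases h' : PySem.Chars.isspace c' <;> simp only [h', if_true, if_false]
    · cases cur <;> simp [ih]
    · exact ih _

theorem pvW_all_space (t : List Char) (h : ∀ c ∈ t, PySem.Chars.isspace c = true) :
    ∀ cur, pvW t cur = if cur.isEmpty then [] else [cur.reverse] := by
  induction t with
  | nil => intro cur; rfl
  | cons c r ih =>
    intro cur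
    have hc : PySem.Chars.isspace c = true := h c (by simp)
    have hr := ih (fun c hm => h c (by simp [hm]))
    cases cur <;> simp [pvW, hc, hr]

theorem pvW_lstrip (l : List Char) : pvW (PySem.Chars.lstrip l) [] = pvW l [] := by
  unfold PySem.Chars.lstrip
  induction l with
  | nil => rfl
  | cons c r ih =>
    by_cases hc : PySem.Chars.isspace c
    · simpa [List.dropWhile_cons, hc, pvW] using ih
    · simp [List.dropWhile_cons, hc]

theorem pvW_append_space (l t : List Char) (h : ∀ c ∈ t, PySem.Chars.isspace c = true) :
    ∀ cur, pvW (l ++ t) cur = pvW l cur := by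
  induction l with
  | nil => intro cur; simp [pvW, pvW_all_space t h cur]
  | cons c r ih =>
    intro cur
    simp only [List.cons_append, pvW]
    by_cases hc : PySem.Chars.isspace c <;> simp only [hc, if_true, if_false]
    · cases cur <;> simp [ih]
    · exact ih _

theorem pvW_strip (l : List Char) : pvW (PySem.Chars.strip l) [] = pvW l [] := by
  unfold PySem.Chars.strip PySem.Chars.rstrip
  have hdec : PySem.Chars.lstrip l
      = (List.dropWhile PySem.Chars.isspace (PySem.Chars.lstrip l).reverse).reverse
        ++ (List.takeWhile PySem.Chars.isspace (PySem.Chars.lstrip l).reverse).reverse := by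
    rw [← List.reverse_append, List.takeWhile_append_dropWhile, List.reverse_reverse]
  have hsp : ∀ c ∈ (List.takeWhile PySem.Chars.isspace (PySem.Chars.lstrip l).reverse).reverse,
      PySem.Chars.isspace c = true := by
    intro c hm
    exact List.mem_takeWhile_imp (List.mem_reverse.mp hm)
  calc pvW (List.dropWhile PySem.Chars.isspace (PySem.Chars.lstrip l).reverse).reverse []
      = pvW (PySem.Chars.lstrip l) [] := by
        conv_rhs => rw [hdec]
        rw [pvW_append_space _ _ hsp]
    _ = pvW l [] := pvW_lstrip l

theorem pvSL_flat (isB : Char → Bool) (hB : ∀ c, isB c = true → PySem.Chars.isspace c = true) :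
    ∀ s cur, (pvSL isB s cur).flatMap (fun l => pvW l []) = pvW (cur.reverse ++ s) [] := by
  intro s cur
  fun_induction pvSL isB s cur with
  | case1 cur h => simp_all [pvW]
  | case2 cur h => simp [pvW]
  | case3 r cur ih =>
    have h1 : PySem.Chars.isspace '\r' = true := by decide
    have h2 : PySem.Chars.isspace '\n' = true := by decide
    simp only [List.flatMap_cons, ih, List.reverse_nil, List.nil_append]
    rw [pvW_space_append cur.reverse ('\n' :: r) '\r' h1, pvW]
    simp [h2]
  | case4 c r cur hne h ih =>
    simp only [List.flatMap_cons, ih, List.reverse_nil, List.nil_append]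
    rw [pvW_space_append cur.reverse r c (hB c h)]
  | case5 c r cur hne h ih =>
    rw [ih]
    simp

theorem pvSplit₀_eq (s : List Char) : PySem.Chars.split₀ s = pvW s [] := by
  simpa using pvW_go s [] []

theorem pvTokenization (s : List Char) :
    (PySem.Chars.splitlines s).flatMap (fun l => PySem.Chars.split₀ (PySem.Chars.strip l))
      = PySem.Chars.split₀ s := by
  have hfun : (fun l => PySem.Chars.split₀ (PySem.Chars.strip l)) = (fun l => pvW l []) := by
    funext l
    rw [pvSplit₀_eq, pvW_strip]
  rw [hfun, pvSplit₀_eq]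
  unfold PySem.Chars.splitlines
  rw [pvSL_go]
  simpa using pvSL_flat _ (by
    intro c h
    simp only [Bool.or_eq_true, decide_eq_true_eq] at h
    simp only [PySem.Chars.isspace, Bool.or_eq_true, Bool.and_eq_true, decide_eq_true_eq]
    omega) s []

theorem pvIsIn_eq (t : List Char) : PySem.Chars.isIn ['='] t = true ↔ '=' ∈ t := by
  rw [PySem.Chars.isIn_iff_infix]
  exact List.singleton_infix_iff '=' t

theorem pvGo_zero (sep : List Char) (fuel : Nat) (s cur acc : _) (hf : 0 < fuel) :
    PySem.Chars.splitOnMax.go sep fuel 0 s cur acc = ((cur.reverse ++ s) :: acc).reverse := by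
  obtain ⟨f, rfl⟩ := Nat.exists_eq_succ_of_ne_zero hf.ne'
  cases s <;> simp [PySem.Chars.splitOnMax.go]

theorem pvGo_one (s : List Char) : ∀ (fuel : Nat) (cur acc : _), s.length < fuel → '=' ∈ s →
    PySem.Chars.splitOnMax.go ['='] fuel 1 s cur acc
      = acc.reverse ++ [cur.reverse ++ s.takeWhile (fun c => c != '='),
                        (s.dropWhile (fun c => c != '=')).tail] := by
  induction s with
  | nil => intro fuel cur acc hf hm; simp at hm
  | cons c r ih =>
    intro fuel cur acc hf hm
    obtain ⟨f, rfl⟩ : ∃ f, fuel = f + 1 := ⟨fuel - 1, by omega⟩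
    simp only [PySem.Chars.splitOnMax.go]
    by_cases hc : c = '='
    · subst hc
      have hpre : List.isPrefixOf ['='] ('=' :: r) = true := by simp [List.isPrefixOf]
      simp only [hpre, if_true]
      rw [pvGo_zero _ f _ _ _ (by simp at hf; omega)]
      simp [List.takeWhile, List.dropWhile]
    · have hpre : List.isPrefixOf ['='] (c :: r) = false := by
        simp [List.isPrefixOf]
        exact fun h => hc h.symm
      have hm' : '=' ∈ r := by
        rcases List.mem_cons.mp hm with h | h
        · exact absurd h.symm hc
        · exact h
      simp only [hpre, if_neg (by omega : ¬ (1:Nat) = 0)]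
      simp only [Bool.false_eq_true, if_false]
      rw [ih f (c :: cur) acc (by simp at hf ⊢; omega) hm']
      have hcb : (c != '=') = true := by simp [hc]
      simp [List.takeWhile, List.dropWhile, hcb]

theorem pvSplitOnMax_one (s : List Char) (h : '=' ∈ s) :
    PySem.Chars.splitOnMax s ['='] 1
      = [s.takeWhile (fun c => c != '='), (s.dropWhile (fun c => c != '=')).tail] := by
  unfold PySem.Chars.splitOnMax
  rw [if_neg (by omega)]
  simpa using pvGo_one s (s.length + 1) [] [] (by omega) h

theorem pvParseTok_eq (t : List Char) (h : '=' ∈ t) :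
    pvParseTok t = some (t.takeWhile (fun c => c != '='), (t.dropWhile (fun c => c != '=')).tail) := by
  unfold pvParseTok
  rw [if_pos ((pvIsIn_eq t).mpr h), pvSplitOnMax_one t h]

theorem pvParseTok_none (t : List Char) (h : ¬ '=' ∈ t) : pvParseTok t = none := by
  unfold pvParseTok
  rw [if_neg (fun hb => h ((pvIsIn_eq t).mp hb))]

theorem pvPairs_eq (toks : List (List Char)) :
    toks.filterMap pvParseTok
      = (toks.filter (fun t => PySem.Chars.isIn ['='] t)).map
          (fun t => (t.takeWhile (fun c => c != '='), (t.dropWhile (fun c => c != '=')).tail)) := by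
  induction toks with
  | nil => rfl
  | cons t ts ih =>
    by_cases h : '=' ∈ t
    · rw [List.filterMap_cons, pvParseTok_eq t h, List.filter_cons,
        if_pos (by exact (pvIsIn_eq t).mpr h), List.map_cons, ih]
    · rw [List.filterMap_cons, pvParseTok_none t h, List.filter_cons,
        if_neg (by simp [pvIsIn_eq t, h]), ih]

theorem pvTakeWhile_NN (t : List Char) (h : '=' ∈ t) :
    t.takeWhile (fun c => c != '=') = pvNN ↔ PySem.Chars.startswith t (pvNN ++ ['=']) = true := by
  constructor
  · intro htw
    have hsplit := List.takeWhile_append_dropWhile (p := fun c => c != '=') (l := t)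
    have hdw : t.dropWhile (fun c => c != '=') ≠ [] := by
      intro hnil
      rw [hnil, List.append_nil, htw] at hsplit
      rw [← hsplit] at h
      revert h; decide
    obtain ⟨d, ds, hds⟩ := List.exists_cons_of_ne_nil hdw
    have hd : d = '=' := by
      have h2 := List.head_dropWhile_not (p := fun c => c != '=') (l := t) (by rw [hds]; simp)
      simp only [hds, List.head_cons] at h2
      simpa using h2
    rw [PySem.Chars.startswith, List.isPrefixOf_iff_prefix]
    refine ⟨ds, ?_⟩
    rw [← hsplit, htw, hds, hd]
    simp
  · intro hsw
    rw [PySem.Chars.startswith, List.isPrefixOf_iff_prefix] at hsw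
    obtain ⟨rest, hrest⟩ := hsw
    rw [← hrest, List.append_assoc, List.takeWhile_append]
    have hnn : List.takeWhile (fun c => c != '=') pvNN = pvNN := by decide
    rw [hnn]
    simp

-- A's step, specialized to a parsed pair
def pvPairStep (st : List (List (String × String)) × Option (PySem.Dict (List Char) (List Char)))
    (p : List Char × List Char) :
    List (List (String × String)) × Option (PySem.Dict (List Char) (List Char)) :=
  let st1 :=
    if p.1 = pvNN then
      ((match st.2 with
        | some d => if d.items.isEmpty then st.1 else st.1 ++ [pvConv d.items]
        | none => st.1),
       some (PySem.Dict.mk []))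
    else st
  match st1.2 with
  | some d => (st1.1, some (d.insert p.1 p.2))
  | none => st1

def pvFinal (st : List (List (String × String)) × Option (PySem.Dict (List Char) (List Char))) :
    List (List (String × String)) :=
  match st.2 with
  | some d => if d.items.isEmpty then st.1 else st.1 ++ [pvConv d.items]
  | none => st.1

theorem pvAStep_eq (st : _) (tok : List Char) :
    pvAStep st tok = match pvParseTok tok with
                     | some p => pvPairStep st p
                     | none => st := by
  by_cases h : '=' ∈ tok
  · rw [pvParseTok_eq tok h]
    unfold pvAStep pvPairStep
    rw [if_pos ((pvIsIn_eq tok).mpr h), pvSplitOnMax_one tok h]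
  · rw [pvParseTok_none tok h]
    unfold pvAStep
    rw [if_neg (fun hb => h ((pvIsIn_eq tok).mp hb))]

theorem pvFoldl_AStep (l : List (List Char)) :
    ∀ (init : List (List (String × String)) × Option (PySem.Dict (List Char) (List Char))),
      (l.filterMap pvParseTok).foldl pvPairStep init = l.foldl pvAStep init := by
  induction l with
  | nil => intro init; rfl
  | cons x xs ih =>
    intro init
    rw [List.filterMap_cons, List.foldl_cons, pvAStep_eq init x]
    cases hpf : pvParseTok x <;> simp only [List.foldl_cons, ih]

theorem pvInsert_ne_nil (d : PySem.Dict (List Char) (List Char)) (k v : List Char) :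
    (d.insert k v).items ≠ [] := by
  unfold PySem.Dict.insert
  by_cases h : d.contains k = true
  · have hne : d.items ≠ [] := by
      intro hnil
      unfold PySem.Dict.contains at h
      rw [hnil] at h
      simp at h
    simp only [h, if_true]
    simpa using hne
  · simp only [h]
    simp

def pvCollect (d : PySem.Dict (List Char) (List Char)) :
    List (List Char × List Char) → List (List (String × String))
  | [] => [pvConv d.items]
  | p :: r =>
      if p.1 = pvNN then pvConv d.items :: pvCollect (PySem.Dict.mk [(p.1, p.2)]) r
      else pvCollect (d.insert p.1 p.2) r

theorem pvC1 : ∀ (ps : List (List Char × List Char)) (ret : List (List (String × String)))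
    (d : PySem.Dict (List Char) (List Char)), d.items ≠ [] →
    pvFinal (ps.foldl pvPairStep (ret, some d)) = ret ++ pvCollect d ps := by
  intro ps
  induction ps with
  | nil =>
    intro ret d hd
    simp only [List.foldl_nil, pvFinal, pvCollect]
    rw [if_neg (by simpa using hd)]
  | cons p r ih =>
    intro ret d hd
    rw [List.foldl_cons]
    by_cases hp : p.1 = pvNN
    · have hdE : d.items.isEmpty = false := by simpa [List.isEmpty_iff] using hd
      have hstep : pvPairStep (ret, some d) p
          = (ret ++ [pvConv d.items], some (PySem.Dict.mk [(p.1, p.2)])) := by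
        simp [pvPairStep, hp, hdE, PySem.Dict.insert, PySem.Dict.contains]
      rw [hstep, ih _ _ (by simp), pvCollect, if_pos hp]
      simp
    · have hstep : pvPairStep (ret, some d) p = (ret, some (d.insert p.1 p.2)) := by
        simp [pvPairStep, hp]
      rw [hstep, ih _ _ (pvInsert_ne_nil d p.1 p.2), pvCollect, if_neg hp]

theorem pvC2 : ∀ (ps : List (List Char × List Char)) (d : PySem.Dict (List Char) (List Char)),
    pvCollect d ps
      = pvConv ((ps.takeWhile (fun q => !(q.1 == pvNN))).foldl (fun d p => d.insert p.1 p.2) d).items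
          :: pvBGroups (ps.dropWhile (fun q => !(q.1 == pvNN))) := by
  intro ps
  induction ps with
  | nil => intro d; simp [pvCollect, pvBGroups]
  | cons p r ih =>
    intro d
    by_cases hp : p.1 = pvNN
    · have hb : (!(p.1 == pvNN)) = false := by simp [hp]
      rw [pvCollect, if_pos hp, List.takeWhile_cons, List.dropWhile_cons, hb]
      simp only [Bool.false_eq_true, if_false, List.foldl_nil]
      rw [ih (PySem.Dict.mk [(p.1, p.2)])]
      have hdict : pvDictOf (p :: r.takeWhile (fun q => !(q.1 == pvNN)))
          = (r.takeWhile (fun q => !(q.1 == pvNN))).foldl (fun d p => d.insert p.1 p.2)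
              (PySem.Dict.mk [(p.1, p.2)]) := by
        simp [pvDictOf, PySem.Dict.insert, PySem.Dict.contains]
      rw [pvBGroups, hdict]
    · have hb : (!(p.1 == pvNN)) = true := by simp [hp]
      rw [pvCollect, if_neg hp, List.takeWhile_cons, List.dropWhile_cons, hb]
      simp only [if_true, List.foldl_cons]
      exact ih (d.insert p.1 p.2)

theorem pvC2' (p : List Char × List Char) (r : List (List Char × List Char)) :
    pvBGroups (p :: r) = pvCollect (PySem.Dict.mk [(p.1, p.2)]) r := by
  rw [pvBGroups, pvC2 r (PySem.Dict.mk [(p.1, p.2)])]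
  congr 2

-- ===== VERDICT (by name: the statement is the Claim_ definition above) =====
theorem parse_show_nodes_spec : Claim_equal_parse_show_nodes := by
  intro stdout _ hpre
  unfold Pre_parse_show_nodes at hpre
  unfold Spec_parse_show_nodes parse_show_nodes parse_show_nodes_alt
  have hfold :
      (PySem.Chars.splitlines stdout.toList).foldl
        (fun st line => (PySem.Chars.split₀ (PySem.Chars.strip line)).foldl pvAStep st)
        (([], none) : List (List (String × String)) × Option (PySem.Dict (List Char) (List Char)))
        = ((PySem.Chars.split₀ stdout.toList).filterMap pvParseTok).foldl pvPairStep ([], none) := by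
    rw [pvFoldl_AStep, ← pvTokenization stdout.toList, List.foldl_flatMap]
  show pvFinal ((PySem.Chars.splitlines stdout.toList).foldl
      (fun st line => (PySem.Chars.split₀ (PySem.Chars.strip line)).foldl pvAStep st) ([], none))
      = pvBGroups ((PySem.Chars.split₀ stdout.toList).filterMap pvParseTok)
  rw [hfold]
  cases hps : (PySem.Chars.split₀ stdout.toList).filterMap pvParseTok with
  | nil => simp [pvFinal, pvBGroups]
  | cons p rest =>
    rw [pvPairs_eq] at hps
    cases hft : (PySem.Chars.split₀ stdout.toList).filter (fun t => PySem.Chars.isIn ['='] t) with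
    | nil => rw [hft] at hps; simp at hps
    | cons t ft =>
      rw [hft] at hps
      simp only [List.map_cons, List.cons.injEq] at hps
      obtain ⟨hpt, -⟩ := hps
      have hmem : '=' ∈ t := by
        have : t ∈ (PySem.Chars.split₀ stdout.toList).filter (fun t => PySem.Chars.isIn ['='] t) := by
          rw [hft]; exact List.mem_cons_self ..
        exact (pvIsIn_eq t).mp (List.of_mem_filter this)
      have hstart : PySem.Chars.startswith t (pvNN ++ ['=']) = true := by
        rw [hft] at hpre
        simpa using hpre
      have hp1 : p.1 = pvNN := by
        rw [← hpt]
        exact (pvTakeWhile_NN t hmem).mpr hstart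
      rw [List.foldl_cons]
      have h0 : pvPairStep ([], none) p = ([], some (PySem.Dict.mk [(p.1, p.2)])) := by
        simp [pvPairStep, hp1, PySem.Dict.insert, PySem.Dict.contains]
      rw [h0, pvC1 rest [] _ (by simp), pvC2' p rest]
      simp
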